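-- pv_equiv track=rewrite | github.com/danib549/ui-db | ddl_parser.py | _split_definitions
-- ===== SOURCE A (Python) =====
-- def _split_definitions(body: str) -> list[str]:
--     """Split column/constraint definitions by commas at depth 0."""
--     definitions: list[str] = []
--     current: list[str] = []
--     depth = 0
--     in_string = False
--
--     for char in body:
--         if char == "'" and not in_string:
--             in_string = True
--             current.append(char)
--         elif char == "'" and in_string:
--             in_string = False
--             current.append(char)
--         elif in_string:
--             current.append(char)
--         elif char == '(':
--             depth += 1
--             current.append(char)
--         elif char == ')':
--             depth -= 1
--             current.append(char)
--         elif char == ',' and depth == 0: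
--             definitions.append(''.join(current).strip())
--             current = []
--         else:
--             current.append(char)
--
--     remaining = ''.join(current).strip()
--     if remaining:
--         definitions.append(remaining)
--
--     return definitions
-- ===== SOURCE B (Python) =====
-- def _split_definitions(body: str) -> list[str]:
--     """Split column/constraint definitions by commas at depth 0 (two-pass:
--     find delimiter positions first, then slice)."""
--     cuts = _depth0_commas(body)
--     parts = []
--     start = 0
--     for c in cuts:
--         parts.append(body[start:c].strip())
--         start = c + 1
--     tail = body[start:].strip()
--     if tail:
--         parts.append(tail)
--     return parts
--
--
-- def _depth0_commas(body: str) -> list[int]: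
--     cuts = []
--     depth = 0
--     in_string = False
--     for i, ch in enumerate(body):
--         if ch == "'":
--             in_string = not in_string
--         elif in_string:
--             pass
--         elif ch == '(':
--             depth += 1
--         elif ch == ')':
--             depth -= 1
--         elif ch == ',' and depth == 0:
--             cuts.append(i)
--     return cuts
-- ===== Notes on version B (the rewrite author's own statement) =====
-- stated objective: alternative
-- what changed: B separates delimiter-finding from segment extraction: a first pass records the indices of depth-0 outside-string commas, a second pass slices the body between consecutive boundaries (intermediate slices appended unconditionally after strip, the trailing slice only if non-empty), instead of A's single pass that accumulates the current segment character by character.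
import Mathlib
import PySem

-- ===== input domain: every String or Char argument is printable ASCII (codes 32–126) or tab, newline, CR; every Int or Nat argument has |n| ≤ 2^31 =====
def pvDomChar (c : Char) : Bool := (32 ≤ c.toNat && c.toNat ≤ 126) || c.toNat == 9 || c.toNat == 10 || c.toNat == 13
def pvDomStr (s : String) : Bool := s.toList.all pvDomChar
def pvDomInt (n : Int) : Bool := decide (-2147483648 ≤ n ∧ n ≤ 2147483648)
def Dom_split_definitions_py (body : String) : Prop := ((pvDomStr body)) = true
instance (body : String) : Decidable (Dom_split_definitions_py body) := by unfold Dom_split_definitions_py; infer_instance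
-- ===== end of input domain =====

-- B re-decomposes A's single accumulating scan into two passes (find depth-0 comma indices, then slice);
-- same cost, different structure. Proved equal on all inputs (A is total).

-- ===== PORT A =====
-- the for-loop of A, state (definitions, current, depth, in_string); branches in A's order
def pvLoopA : List Char → List String → List Char → Int → Bool → List String × List Char
  | [], defs, cur, _, _ => (defs, cur)
  | c :: rest, defs, cur, depth, instr =>
    if c = '\'' ∧ instr = false then pvLoopA rest defs (cur ++ [c]) depth true
    else if c = '\'' ∧ instr = true then pvLoopA rest defs (cur ++ [c]) depth false
    else if instr = true then pvLoopA rest defs (cur ++ [c]) depth instr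
    else if c = '(' then pvLoopA rest defs (cur ++ [c]) (depth + 1) instr
    else if c = ')' then pvLoopA rest defs (cur ++ [c]) (depth - 1) instr
    else if c = ',' ∧ depth = 0 then
      pvLoopA rest (defs ++ [String.mk (PySem.Chars.strip cur)]) [] depth instr
    else pvLoopA rest defs (cur ++ [c]) depth instr

def split_definitions_py (body : String) : List String :=
  let st := pvLoopA body.toList [] [] 0 false
  let remaining := PySem.Chars.strip st.2          -- ''.join(current).strip()
  if remaining ≠ [] then st.1 ++ [String.mk remaining] else st.1

-- ===== PORT B =====
-- pass 1 (_depth0_commas): indices of depth-0 outside-string commas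
def pvCommas : List Char → Nat → List Nat → Int → Bool → List Nat
  | [], _, cuts, _, _ => cuts
  | c :: rest, i, cuts, depth, instr =>
    if c = '\'' then pvCommas rest (i + 1) cuts depth (!instr)
    else if instr = true then pvCommas rest (i + 1) cuts depth instr
    else if c = '(' then pvCommas rest (i + 1) cuts (depth + 1) instr
    else if c = ')' then pvCommas rest (i + 1) cuts (depth - 1) instr
    else if c = ',' ∧ depth = 0 then pvCommas rest (i + 1) (cuts ++ [i]) depth instr
    else pvCommas rest (i + 1) cuts depth instr

-- pass 2 loop: slice between consecutive boundaries
def pvSlices : List Nat → List Char → List String → Nat → List String × Nat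
  | [], _, parts, start => (parts, start)
  | c :: rest, full, parts, start =>
    pvSlices rest full
      (parts ++ [String.mk (PySem.Chars.strip
        (PySem.List.slice full (some (start : Int)) (some (c : Int))))]) (c + 1)

-- pass 2 tail: body[start:].strip(), appended only if non-empty
def pvFinishB (full : List Char) (cuts : List Nat) (start : Nat) : List String :=
  let p := pvSlices cuts full [] start
  let tail := PySem.Chars.strip (PySem.List.slice full (some ((p.2 : Int))) none)
  if tail ≠ [] then p.1 ++ [String.mk tail] else p.1

def split_definitions_py_alt (body : String) : List String :=
  let full := body.toList
  pvFinishB full (pvCommas full 0 [] 0 false) 0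

-- ===== PRECONDITION & SPEC =====
def Spec_split_definitions_py (body : String) (out : List String) : Prop := out = split_definitions_py_alt body
instance (body : String) (out : List String) : Decidable (Spec_split_definitions_py body out) := by unfold Spec_split_definitions_py; infer_instance

-- ===== CLAIM (what is proved, stated in full; the proofs are below) =====
def Claim_equal_split_definitions_py : Prop := ∀ (body : String), Dom_split_definitions_py body → Spec_split_definitions_py body (split_definitions_py body)

-- ===== LEMMAS AND PROOFS =====

-- common specification both ports are reduced to
def pvSpec : List Char → List Char → Int → Bool → List String
  | [], cur, _, _ =>
    let rem := PySem.Chars.strip cur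
    if rem ≠ [] then [String.mk rem] else []
  | c :: rest, cur, depth, instr =>
    if c = '\'' ∧ instr = false then pvSpec rest (cur ++ [c]) depth true
    else if c = '\'' ∧ instr = true then pvSpec rest (cur ++ [c]) depth false
    else if instr = true then pvSpec rest (cur ++ [c]) depth instr
    else if c = '(' then pvSpec rest (cur ++ [c]) (depth + 1) instr
    else if c = ')' then pvSpec rest (cur ++ [c]) (depth - 1) instr
    else if c = ',' ∧ depth = 0 then
      String.mk (PySem.Chars.strip cur) :: pvSpec rest [] depth instr
    else pvSpec rest (cur ++ [c]) depth instr

def pvFinishA (st : List String × List Char) : List String :=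
  let remaining := PySem.Chars.strip st.2
  if remaining ≠ [] then st.1 ++ [String.mk remaining] else st.1

theorem pvA_eq (l : List Char) : ∀ (defs : List String) (cur : List Char) (depth : Int) (instr : Bool),
    pvFinishA (pvLoopA l defs cur depth instr) = defs ++ pvSpec l cur depth instr := by
  induction l with
  | nil =>
    intro defs cur depth instr
    simp only [pvLoopA, pvSpec, pvFinishA]
    split <;> simp
  | cons c rest ih =>
    intro defs cur depth instr
    simp only [pvLoopA, pvSpec]
    split_ifs <;> simp [ih]

theorem pvCommas_acc (l : List Char) : ∀ (i : Nat) (cuts : List Nat) (depth : Int) (instr : Bool),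
    pvCommas l i cuts depth instr = cuts ++ pvCommas l i [] depth instr := by
  induction l with
  | nil => intro i cuts depth instr; simp [pvCommas]
  | cons c rest ih =>
    intro i cuts depth instr
    simp only [pvCommas]
    split_ifs <;> (conv_lhs => rw [ih]) <;> (conv_rhs => rw [ih]) <;> simp

theorem pvSlices_acc (cuts : List Nat) : ∀ (full : List Char) (parts : List String) (start : Nat),
    pvSlices cuts full parts start
      = (parts ++ (pvSlices cuts full [] start).1, (pvSlices cuts full [] start).2) := by
  induction cuts with
  | nil => intro full parts start; simp [pvSlices]
  | cons c rest ih =>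
    intro full parts start
    simp only [pvSlices]
    conv_lhs => rw [ih]
    conv_rhs => rw [ih]
    simp

theorem pvFinishB_cons (full : List Char) (c : Nat) (cuts : List Nat) (start : Nat) :
    pvFinishB full (c :: cuts) start
      = String.mk (PySem.Chars.strip (PySem.List.slice full (some (start : Int)) (some (c : Int))))
        :: pvFinishB full cuts (c + 1) := by
  simp only [pvFinishB, pvSlices]
  rw [pvSlices_acc]
  split <;> simp

theorem pvB_eq (full : List Char) : ∀ (l : List Char) (i start : Nat) (depth : Int) (instr : Bool),
    start ≤ i → full.drop i = l →
    pvFinishB full (pvCommas l i [] depth instr) start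
      = pvSpec l ((full.drop start).take (i - start)) depth instr := by
  intro l
  induction l with
  | nil =>
    intro i start depth instr hsi hdrop
    have hlen : full.length ≤ i := by
      by_contra h
      push_neg at h
      have := List.drop_eq_getElem_cons h
      rw [hdrop] at this
      simp at this
      omega
    simp only [pvCommas, pvFinishB, pvSlices, pvSpec]
    rw [PySem.List.slice_from_natCast]
    have : (full.drop start).take (i - start) = full.drop start := by
      apply List.take_of_length_le
      simp; omega
    rw [this]
    split <;> simp
  | cons c rest ih =>
    intro i start depth instr hsi hdrop
    have hi : i < full.length := by
      by_contra h
      push_neg at h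
      rw [List.drop_eq_nil_of_le h] at hdrop
      simp at hdrop
    have hget : full[i] = c := by
      have := List.drop_eq_getElem_cons hi
      rw [hdrop] at this
      exact (List.cons.injEq _ _ _ _ ▸ this).1.symm
    have hrest : full.drop (i + 1) = rest := by
      have := List.drop_eq_getElem_cons hi
      rw [hdrop] at this
      exact (List.cons.injEq _ _ _ _ ▸ this).2.symm
    have hext : (full.drop start).take (i + 1 - start) = (full.drop start).take (i - start) ++ [c] := by
      have h1 : i - start < (full.drop start).length := by simp; omega
      have : i + 1 - start = (i - start) + 1 := by omega
      rw [this, List.take_succ]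
      congr 1
      have : (full.drop start)[i - start]? = some ((full.drop start)[i - start]) :=
        List.getElem?_eq_getElem h1
      rw [this]
      simp only [List.getElem_drop]
      have : start + (i - start) = i := by omega
      simp [this, hget]
    simp only [pvCommas, pvSpec]
    by_cases hq : c = '\''
    · subst hq
      cases instr with
      | false =>
        simp only [Bool.not_false, reduceIte]
        rw [ih (i + 1) start depth true (by omega) hrest, hext]
        simp
      | true =>
        simp only [Bool.not_true, reduceIte]
        rw [ih (i + 1) start depth false (by omega) hrest, hext]
        simp
    · rw [if_neg hq, if_neg (show ¬(c = '\'' ∧ instr = false) from fun h => hq h.1),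
          if_neg (show ¬(c = '\'' ∧ instr = true) from fun h => hq h.1)]
      by_cases hs : instr = true
      · rw [if_pos hs, if_pos hs]
        rw [ih (i + 1) start depth instr (by omega) hrest, hext]
      · rw [if_neg hs, if_neg hs]
        by_cases hp : c = '('
        · rw [if_pos hp, if_pos hp]
          rw [ih (i + 1) start (depth + 1) instr (by omega) hrest, hext]
        · rw [if_neg hp, if_neg hp]
          by_cases hc : c = ')'
          · rw [if_pos hc, if_pos hc]
            rw [ih (i + 1) start (depth - 1) instr (by omega) hrest, hext]
          · rw [if_neg hc, if_neg hc]
            by_cases hcm : c = ',' ∧ depth = 0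
            · rw [if_pos hcm, if_pos hcm]
              rw [pvCommas_acc]
              simp only [List.nil_append, List.singleton_append]
              rw [pvFinishB_cons]
              rw [ih (i + 1) (i + 1) depth instr (by omega) hrest]
              congr 2
              · rw [PySem.List.slice_natCast]
              · simp
            · rw [if_neg hcm, if_neg hcm]
              rw [ih (i + 1) start depth instr (by omega) hrest, hext]

-- ===== VERDICT (by name: the statement is the Claim_ definition above) =====
theorem split_definitions_py_spec : Claim_equal_split_definitions_py := by
  intro body _
  unfold Spec_split_definitions_py split_definitions_py split_definitions_py_alt
  have hA : pvFinishA (pvLoopA body.toList [] [] 0 false) = pvSpec body.toList [] 0 false := by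
    rw [pvA_eq]; simp
  have hB := pvB_eq body.toList body.toList 0 0 0 false (le_refl 0) (by simp)
  simp only [Nat.sub_self, List.take_zero] at hB
  rw [show (pvFinishA (pvLoopA body.toList [] [] 0 false) : List String)
        = (let st := pvLoopA body.toList [] [] 0 false;
           let remaining := PySem.Chars.strip st.2;
           if remaining ≠ [] then st.1 ++ [String.mk remaining] else st.1) from rfl] at hA
  rw [hA, hB]
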